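-- pv_equiv track=rewrite | github.com/Nishchaie/ch.ai | src/chai/core/router.py | _infer_roles_from_keywords
-- ===== SOURCE A (Python) =====
-- from typing import Any, Callable, List, Optional
--
-- def _infer_roles_from_keywords(lower: str, word_set: set[str]) -> List[str]:
--     """Scan prompt keywords to decide which specialist roles are needed."""
--     _ROLE_KEYWORDS = {
--         "frontend": {
--             "component", "css", "tsx", "jsx", "react", "ui", "frontend",
--             "page", "layout", "style", "html", "tailwind", "vue", "svelte",
--             "next", "vite", "sidebar", "navbar", "modal", "button", "form",
--         },
--         "backend": {
--             "api", "endpoint", "server", "database", "sql", "model",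
--             "migration", "backend", "fastapi", "django", "flask", "express",
--             "graphql", "rest", "schema", "orm", "auth", "authentication",
--             "middleware", "route", "handler",
--         },
--         "qa": {
--             "test", "tests", "testing", "spec", "assert", "coverage",
--             "e2e", "integration", "unit", "pytest", "jest", "cypress",
--             "playwright", "fixture", "mock",
--         },
--         "deployment": {
--             "deploy", "docker", "ci", "cd", "pipeline", "infra",
--             "kubernetes", "k8s", "terraform", "aws", "gcp", "azure",
--             "nginx", "dockerfile", "compose", "helm", "monitoring",
--         },
--         "prompt": {
--             "prompt", "llm", "gpt", "claude", "embedding", "token",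
--             "fine-tune", "finetune", "rag", "vector", "chain",
--         },
--         "researcher": {
--             "research", "compare", "evaluate", "tradeoff", "analysis",
--             "survey", "benchmark", "alternative", "pros", "cons",
--         },
--     }
--
--     roles: List[str] = ["lead"]
--     for role, keywords in _ROLE_KEYWORDS.items():
--         if keywords & word_set:
--             roles.append(role)
--
--     if len(roles) == 1:
--         roles.append("backend")
--
--     return roles
-- ===== SOURCE B (Python) =====
-- from typing import List
--
-- _ORDER = ["frontend", "backend", "qa", "deployment", "prompt", "researcher"]
--
-- # Keyword table stored as one whitespace-separated string per role.
-- _TABLE = {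
--     "frontend": ("component css tsx jsx react ui frontend page layout style "
--                  "html tailwind vue svelte next vite sidebar navbar modal button form"),
--     "backend": ("api endpoint server database sql model migration backend fastapi "
--                 "django flask express graphql rest schema orm auth authentication "
--                 "middleware route handler"),
--     "qa": ("test tests testing spec assert coverage e2e integration unit pytest "
--            "jest cypress playwright fixture mock"),
--     "deployment": ("deploy docker ci cd pipeline infra kubernetes k8s terraform "
--                    "aws gcp azure nginx dockerfile compose helm monitoring"),
--     "prompt": "prompt llm gpt claude embedding token fine-tune finetune rag vector chain",
--     "researcher": ("research compare evaluate tradeoff analysis survey benchmark "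
--                    "alternative pros cons"),
-- }
--
-- # inverted index: keyword -> role (roles' keyword sets are disjoint)
-- _KEYWORD_ROLE = {kw: role for role, s in _TABLE.items() for kw in s.split()}
--
--
-- def _infer_roles_from_keywords(lower: str, word_set: set[str]) -> List[str]:
--     """Scan prompt keywords to decide which specialist roles are needed."""
--     matched = set()
--     for word in word_set:
--         role = _KEYWORD_ROLE.get(word)
--         if role is not None:
--             matched.add(role)
--     hits = [role for role in _ORDER if role in matched]
--     return ["lead"] + (hits if hits else ["backend"])
-- ===== Notes on version B (the rewrite author's own statement) =====
-- stated objective: alternative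
-- what changed: Replaces A's per-role set-intersection over six keyword sets by a keyword-to-role inverted index (built by splitting per-role keyword strings) consulted once per word, accumulating matched roles into a set and emitting them in the fixed canonical role order.
import Mathlib
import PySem

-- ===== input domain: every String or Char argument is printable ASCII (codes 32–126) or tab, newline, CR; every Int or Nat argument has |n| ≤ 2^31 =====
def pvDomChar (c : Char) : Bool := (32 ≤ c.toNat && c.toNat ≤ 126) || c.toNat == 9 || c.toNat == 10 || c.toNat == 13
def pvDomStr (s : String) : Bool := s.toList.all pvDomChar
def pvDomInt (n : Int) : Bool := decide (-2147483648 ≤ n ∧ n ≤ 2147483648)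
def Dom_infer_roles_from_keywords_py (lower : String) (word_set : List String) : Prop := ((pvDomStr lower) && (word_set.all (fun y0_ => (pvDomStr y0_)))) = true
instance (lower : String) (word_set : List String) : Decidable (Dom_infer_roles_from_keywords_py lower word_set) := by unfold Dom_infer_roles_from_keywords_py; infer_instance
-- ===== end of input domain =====

-- B replaces A's per-role set-intersection scan by a keyword→role inverted index built by
-- splitting per-role keyword strings, consulted once per word (objective: alternative).

-- ===== PORT A =====
-- A's _ROLE_KEYWORDS table
def ROLE_KEYWORDS : List (String × List String) :=
  [ ("frontend",
      ["component", "css", "tsx", "jsx", "react", "ui", "frontend",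
       "page", "layout", "style", "html", "tailwind", "vue", "svelte",
       "next", "vite", "sidebar", "navbar", "modal", "button", "form"]),
    ("backend",
      ["api", "endpoint", "server", "database", "sql", "model",
       "migration", "backend", "fastapi", "django", "flask", "express",
       "graphql", "rest", "schema", "orm", "auth", "authentication",
       "middleware", "route", "handler"]),
    ("qa",
      ["test", "tests", "testing", "spec", "assert", "coverage",
       "e2e", "integration", "unit", "pytest", "jest", "cypress",
       "playwright", "fixture", "mock"]),
    ("deployment",
      ["deploy", "docker", "ci", "cd", "pipeline", "infra",
       "kubernetes", "k8s", "terraform", "aws", "gcp", "azure",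
       "nginx", "dockerfile", "compose", "helm", "monitoring"]),
    ("prompt",
      ["prompt", "llm", "gpt", "claude", "embedding", "token",
       "fine-tune", "finetune", "rag", "vector", "chain"]),
    ("researcher",
      ["research", "compare", "evaluate", "tradeoff", "analysis",
       "survey", "benchmark", "alternative", "pros", "cons"]) ]

-- A: roles = ["lead"]; for role, keywords in items: if keywords & word_set: roles.append(role);
--    if len(roles) == 1: roles.append("backend")
def infer_roles_from_keywords_py (lower : String) (word_set : List String) : List String :=
  let roles :=
    ROLE_KEYWORDS.foldl
      (fun roles p =>
        if !(PySem.Set.inter p.2 word_set).isEmpty then roles ++ [p.1] else roles)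
      ["lead"]
  if roles.length = 1 then roles ++ ["backend"] else roles

-- ===== PORT B =====
-- canonical role order (_ORDER)
def ORDER_B : List String :=
  ["frontend", "backend", "qa", "deployment", "prompt", "researcher"]

-- B's _TABLE: one whitespace-separated keyword string per role
def TABLE_B : List (String × String) :=
  [ ("frontend",
     "component css tsx jsx react ui frontend page layout style html tailwind vue svelte next vite sidebar navbar modal button form"),
    ("backend",
     "api endpoint server database sql model migration backend fastapi django flask express graphql rest schema orm auth authentication middleware route handler"),
    ("qa",
     "test tests testing spec assert coverage e2e integration unit pytest jest cypress playwright fixture mock"),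
    ("deployment",
     "deploy docker ci cd pipeline infra kubernetes k8s terraform aws gcp azure nginx dockerfile compose helm monitoring"),
    ("prompt",
     "prompt llm gpt claude embedding token fine-tune finetune rag vector chain"),
    ("researcher",
     "research compare evaluate tradeoff analysis survey benchmark alternative pros cons") ]

-- inverted index: {kw: role for role, s in _TABLE.items() for kw in s.split()}
def KEYWORD_ROLE : PySem.Dict String String :=
  PySem.Dict.ofList (TABLE_B.flatMap (fun p => (PySem.Str.split₀ p.2).map (fun k => (k, p.1))))

def infer_roles_from_keywords_py_alt (lower : String) (word_set : List String) : List String :=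
  let matched : PySem.Set String :=
    word_set.foldl
      (fun m w =>
        match KEYWORD_ROLE.get? w with
        | some r => PySem.Set.add m r
        | none => m)
      PySem.Set.empty
  let hits := ORDER_B.filter (fun r => PySem.Set.contains matched r)
  ["lead"] ++ (if hits.isEmpty then ["backend"] else hits)

-- ===== PRECONDITION & SPEC =====
def Spec_infer_roles_from_keywords_py (lower : String) (word_set : List String) (out : List String) : Prop := out = infer_roles_from_keywords_py_alt lower word_set
instance (lower : String) (word_set : List String) (out : List String) : Decidable (Spec_infer_roles_from_keywords_py lower word_set out) := by unfold Spec_infer_roles_from_keywords_py; infer_instance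

-- ===== CLAIM (what is proved, stated in full; the proofs are below) =====
def Claim_equal_infer_roles_from_keywords_py : Prop := ∀ (lower : String) (word_set : List String), Dom_infer_roles_from_keywords_py lower word_set → Spec_infer_roles_from_keywords_py lower word_set (infer_roles_from_keywords_py lower word_set)

-- ===== LEMMAS AND PROOFS =====

-- the keyword→role pair list A's table induces
def kwPairs : List (String × String) :=
  ROLE_KEYWORDS.flatMap (fun p => p.2.map (fun k => (k, p.1)))

set_option maxRecDepth 100000 in
theorem items_KEYWORD_ROLE : KEYWORD_ROLE.items = kwPairs := by decide

set_option maxRecDepth 100000 in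
theorem nodup_keys_KEYWORD_ROLE : KEYWORD_ROLE.keys.Nodup := by decide

theorem get?_KEYWORD_ROLE (w r : String) :
    KEYWORD_ROLE.get? w = some r ↔ (w, r) ∈ kwPairs := by
  rw [PySem.Dict.get?_eq_some_iff_mem_items KEYWORD_ROLE w r nodup_keys_KEYWORD_ROLE,
    items_KEYWORD_ROLE]

theorem mem_kwPairs (w r : String) :
    (w, r) ∈ kwPairs ↔ ∃ p ∈ ROLE_KEYWORDS, w ∈ p.2 ∧ p.1 = r := by
  simp only [kwPairs, List.mem_flatMap, List.mem_map, Prod.mk.injEq]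
  constructor
  · rintro ⟨p, hp, k, hk, rfl, rfl⟩; exact ⟨p, hp, hk, rfl⟩
  · rintro ⟨p, hp, hw, rfl⟩; exact ⟨p, hp, w, hw, rfl, rfl⟩

theorem mem_matched (ws : List String) (m : PySem.Set String) (r : String) :
    r ∈ ws.foldl
      (fun m w =>
        match KEYWORD_ROLE.get? w with
        | some r => PySem.Set.add m r
        | none => m) m ↔ r ∈ m ∨ ∃ w ∈ ws, (w, r) ∈ kwPairs := by
  induction ws generalizing m with
  | nil => simp
  | cons w ws ih =>
    simp only [List.foldl_cons]
    rw [ih]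
    have key : ∀ x : String,
        x ∈ (match KEYWORD_ROLE.get? w with
             | some r => PySem.Set.add m r
             | none => m) ↔ x ∈ m ∨ (w, x) ∈ kwPairs := by
      intro x
      cases h : KEYWORD_ROLE.get? w with
      | none =>
        constructor
        · exact Or.inl
        · rintro (hm | hp)
          · exact hm
          · have h2 := (get?_KEYWORD_ROLE w x).mpr hp
            rw [h] at h2
            cases h2
      | some r' =>
        simp only [PySem.Set.mem_add]
        constructor
        · rintro (hm | hx)
          · exact Or.inl hm
          · exact Or.inr (by rw [hx]; exact (get?_KEYWORD_ROLE w r').mp h)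
        · rintro (hm | hp)
          · exact Or.inl hm
          · have h2 := (get?_KEYWORD_ROLE w x).mpr hp
            rw [h] at h2
            exact Or.inr (Option.some.inj h2).symm
    rw [key r]
    simp only [List.mem_cons]
    constructor
    · rintro ((hm | hp) | ⟨w', hw', hp⟩)
      · exact Or.inl hm
      · exact Or.inr ⟨w, Or.inl rfl, hp⟩
      · exact Or.inr ⟨w', Or.inr hw', hp⟩
    · rintro (hm | ⟨w', hw' | hw', hp⟩)
      · exact Or.inl (Or.inl hm)
      · exact Or.inl (Or.inr (hw' ▸ hp))
      · exact Or.inr ⟨w', hw', hp⟩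

-- A's per-role test equals B's membership test in the matched set
set_option maxRecDepth 8000 in
theorem hit_iff (ws : List String) (r : String) (kws : List String)
    (hmem : ∀ w, (w, r) ∈ kwPairs ↔ w ∈ kws) :
    (!(PySem.Set.inter kws ws).isEmpty) = true ↔
      r ∈ ws.foldl
        (fun m w =>
          match KEYWORD_ROLE.get? w with
          | some r => PySem.Set.add m r
          | none => m) PySem.Set.empty := by
  rw [mem_matched]
  simp only [PySem.Set.empty, List.not_mem_nil, false_or, Bool.not_eq_true',
    List.isEmpty_eq_false_iff, ← List.length_pos_iff, List.length_pos_iff_exists_mem]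
  constructor
  · rintro ⟨k, hk⟩
    have h := (PySem.Set.mem_inter _ _ _).mp hk
    exact ⟨k, h.2, (hmem k).mpr h.1⟩
  · rintro ⟨w, hw, hp⟩
    exact ⟨w, (PySem.Set.mem_inter _ _ _).mpr ⟨(hmem w).mp hp, hw⟩⟩

set_option maxRecDepth 8000 in
theorem hit_frontend (ws : List String) :
    (!(PySem.Set.inter (["component", "css", "tsx", "jsx", "react", "ui", "frontend", "page", "layout", "style", "html", "tailwind", "vue", "svelte", "next", "vite", "sidebar", "navbar", "modal", "button", "form"] : List String) ws).isEmpty) =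
      PySem.Set.contains
        (ws.foldl
          (fun m w =>
            match KEYWORD_ROLE.get? w with
            | some r => PySem.Set.add m r
            | none => m) PySem.Set.empty) "frontend" := by
  rw [Bool.eq_iff_iff, PySem.Set.contains_iff]
  exact hit_iff ws "frontend" _ (fun w => by rw [mem_kwPairs]; simp [ROLE_KEYWORDS])

set_option maxRecDepth 8000 in
theorem hit_backend (ws : List String) :
    (!(PySem.Set.inter (["api", "endpoint", "server", "database", "sql", "model", "migration", "backend", "fastapi", "django", "flask", "express", "graphql", "rest", "schema", "orm", "auth", "authentication", "middleware", "route", "handler"] : List String) ws).isEmpty) =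
      PySem.Set.contains
        (ws.foldl
          (fun m w =>
            match KEYWORD_ROLE.get? w with
            | some r => PySem.Set.add m r
            | none => m) PySem.Set.empty) "backend" := by
  rw [Bool.eq_iff_iff, PySem.Set.contains_iff]
  exact hit_iff ws "backend" _ (fun w => by rw [mem_kwPairs]; simp [ROLE_KEYWORDS])

set_option maxRecDepth 8000 in
theorem hit_qa (ws : List String) :
    (!(PySem.Set.inter (["test", "tests", "testing", "spec", "assert", "coverage", "e2e", "integration", "unit", "pytest", "jest", "cypress", "playwright", "fixture", "mock"] : List String) ws).isEmpty) =
      PySem.Set.contains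
        (ws.foldl
          (fun m w =>
            match KEYWORD_ROLE.get? w with
            | some r => PySem.Set.add m r
            | none => m) PySem.Set.empty) "qa" := by
  rw [Bool.eq_iff_iff, PySem.Set.contains_iff]
  exact hit_iff ws "qa" _ (fun w => by rw [mem_kwPairs]; simp [ROLE_KEYWORDS])

set_option maxRecDepth 8000 in
theorem hit_deployment (ws : List String) :
    (!(PySem.Set.inter (["deploy", "docker", "ci", "cd", "pipeline", "infra", "kubernetes", "k8s", "terraform", "aws", "gcp", "azure", "nginx", "dockerfile", "compose", "helm", "monitoring"] : List String) ws).isEmpty) =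
      PySem.Set.contains
        (ws.foldl
          (fun m w =>
            match KEYWORD_ROLE.get? w with
            | some r => PySem.Set.add m r
            | none => m) PySem.Set.empty) "deployment" := by
  rw [Bool.eq_iff_iff, PySem.Set.contains_iff]
  exact hit_iff ws "deployment" _ (fun w => by rw [mem_kwPairs]; simp [ROLE_KEYWORDS])

set_option maxRecDepth 8000 in
theorem hit_prompt (ws : List String) :
    (!(PySem.Set.inter (["prompt", "llm", "gpt", "claude", "embedding", "token", "fine-tune", "finetune", "rag", "vector", "chain"] : List String) ws).isEmpty) =
      PySem.Set.contains
        (ws.foldl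
          (fun m w =>
            match KEYWORD_ROLE.get? w with
            | some r => PySem.Set.add m r
            | none => m) PySem.Set.empty) "prompt" := by
  rw [Bool.eq_iff_iff, PySem.Set.contains_iff]
  exact hit_iff ws "prompt" _ (fun w => by rw [mem_kwPairs]; simp [ROLE_KEYWORDS])

set_option maxRecDepth 8000 in
theorem hit_researcher (ws : List String) :
    (!(PySem.Set.inter (["research", "compare", "evaluate", "tradeoff", "analysis", "survey", "benchmark", "alternative", "pros", "cons"] : List String) ws).isEmpty) =
      PySem.Set.contains
        (ws.foldl
          (fun m w =>
            match KEYWORD_ROLE.get? w with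
            | some r => PySem.Set.add m r
            | none => m) PySem.Set.empty) "researcher" := by
  rw [Bool.eq_iff_iff, PySem.Set.contains_iff]
  exact hit_iff ws "researcher" _ (fun w => by rw [mem_kwPairs]; simp [ROLE_KEYWORDS])

-- ===== VERDICT (by name: the statement is the Claim_ definition above) =====
theorem infer_roles_from_keywords_py_spec : Claim_equal_infer_roles_from_keywords_py := by
  intro lower ws _
  unfold Spec_infer_roles_from_keywords_py
  unfold infer_roles_from_keywords_py infer_roles_from_keywords_py_alt
  rw [PySem.List.foldl_append_if (fun p => !(PySem.Set.inter p.2 ws).isEmpty) Prod.fst]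
  simp only [ORDER_B, ROLE_KEYWORDS, List.filter_cons, List.filter_nil]
  rw [hit_frontend ws, hit_backend ws, hit_qa ws, hit_deployment ws, hit_prompt ws,
    hit_researcher ws]
  cases PySem.Set.contains _ "frontend" <;>
    cases PySem.Set.contains _ "backend" <;>
      cases PySem.Set.contains _ "qa" <;>
        cases PySem.Set.contains _ "deployment" <;>
          cases PySem.Set.contains _ "prompt" <;>
            cases PySem.Set.contains _ "researcher" <;>
              simp
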